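-- pv_equiv track=rewrite | github.com/zhangsscc99/-research-machine_learning_cancer_drugs | main_folder(ks4)/Untitled-1.py | remove_extradots
-- ===== SOURCE A (Python) =====
-- def remove_extradots(string):
--     counter=0
--     lst=[]
--     for i in range(len(string)):
--         if string[i]=='.' and counter<1 :
--             lst.append(string[i])
--             counter+=1
--         elif string[i]!='.':
--             lst.append(string[i])
--     res="".join(lst)
--     return res
-- ===== SOURCE B (Python) =====
-- def remove_extradots(string):
--     idx = string.find('.')
--     if idx == -1:
--         return string
--     return string[:idx + 1] + string[idx + 1:].replace('.', '')
-- ===== Notes on version B (the rewrite author's own statement) =====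
-- stated objective: faster
-- what changed: Replaces A's counter-guarded per-character Python loop with find + slice + replace: locate the first dot, keep the prefix through it, and strip dots from the remainder with str.replace.
import Mathlib
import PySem

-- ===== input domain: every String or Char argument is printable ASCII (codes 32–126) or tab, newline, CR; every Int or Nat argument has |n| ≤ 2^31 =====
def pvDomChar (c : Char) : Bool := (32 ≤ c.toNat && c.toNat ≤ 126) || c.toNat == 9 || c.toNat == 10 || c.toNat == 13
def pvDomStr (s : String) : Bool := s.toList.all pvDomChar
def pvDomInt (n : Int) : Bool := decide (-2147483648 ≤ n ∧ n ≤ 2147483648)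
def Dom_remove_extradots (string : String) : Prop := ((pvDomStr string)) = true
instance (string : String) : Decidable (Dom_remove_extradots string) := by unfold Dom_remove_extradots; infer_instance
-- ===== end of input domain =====

-- B replaces A's counter-guarded per-character loop with find + slice + replace (keep through first dot, strip dots after).

-- ===== PORT A =====
def remove_extradots (string : String) : String :=
  String.ofList
    ((PySem.List.pyRange 0 (PySem.Str.len string) 1).foldl
      (fun (st : Int × List Char) i =>
        let c := PySem.List.pyGetD string.toList i ' '
        if c = '.' ∧ st.1 < 1 then (st.1 + 1, st.2 ++ [c])
        else if ¬ (c = '.') then (st.1, st.2 ++ [c])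
        else st) (0, [])).2

-- ===== PORT B =====
def remove_extradots_alt (string : String) : String :=
  let idx := PySem.Str.find string "."
  if idx = -1 then string
  else PySem.Str.slice string none (some (idx + 1)) ++
       PySem.Str.replace (PySem.Str.slice string (some (idx + 1)) none) "." ""

-- ===== PRECONDITION & SPEC =====
def Spec_remove_extradots (string : String) (out : String) : Prop := out = remove_extradots_alt string
instance (string : String) (out : String) : Decidable (Spec_remove_extradots string out) := by unfold Spec_remove_extradots; infer_instance

-- ===== CLAIM (what is proved, stated in full; the proofs are below) =====
def Claim_equal_remove_extradots : Prop := ∀ (string : String), Dom_remove_extradots string → Spec_remove_extradots string (remove_extradots string)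

-- ===== LEMMAS AND PROOFS =====

-- A's loop body as a function of the accumulated state and the current character.
def pvStepA (st : Int × List Char) (c : Char) : Int × List Char :=
  if c = '.' ∧ st.1 < 1 then (st.1 + 1, st.2 ++ [c])
  else if ¬ (c = '.') then (st.1, st.2 ++ [c])
  else st

lemma portA_eq (s : String) :
    remove_extradots s = String.ofList ((s.toList.foldl pvStepA ((0 : Int), ([] : List Char))).2) := by
  unfold remove_extradots
  rw [show (fun (st : Int × List Char) (i : Int) =>
        let c := PySem.List.pyGetD s.toList i ' '
        if c = '.' ∧ st.1 < 1 then (st.1 + 1, st.2 ++ [c])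
        else if ¬ (c = '.') then (st.1, st.2 ++ [c])
        else st) = fun st i => pvStepA st (PySem.List.pyGetD s.toList i ' ') from rfl]
  rw [show ((PySem.Str.len s : Int)) = ((s.toList.length : Int)) by simp]
  rw [PySem.List.foldl_pyRange_zero_pyGetD' s.toList ' ' pvStepA ((0 : Int), ([] : List Char))]

lemma fold_nodot (l : List Char) (acc : List Char) (h : ∀ c ∈ l, c ≠ '.') :
    l.foldl pvStepA (0, acc) = (0, acc ++ l) := by
  induction l generalizing acc with
  | nil => simp
  | cons c t ih =>
    have hc : c ≠ '.' := h c (List.mem_cons_self ..)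
    rw [List.foldl_cons, show pvStepA (0, acc) c = (0, acc ++ [c]) by simp [pvStepA, hc]]
    rw [ih (acc ++ [c]) (fun x hx => h x (List.mem_cons_of_mem _ hx))]
    simp

lemma fold_after (l : List Char) (acc : List Char) :
    l.foldl pvStepA (1, acc) = (1, acc ++ l.filter (· ≠ '.')) := by
  induction l generalizing acc with
  | nil => simp
  | cons c t ih =>
    by_cases hc : c = '.'
    · subst hc
      rw [List.foldl_cons, show pvStepA (1, acc) '.' = (1, acc) by simp [pvStepA], ih acc]
      simp
    · rw [List.foldl_cons, show pvStepA (1, acc) c = (1, acc ++ [c]) by simp [pvStepA, hc],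
          ih (acc ++ [c])]
      simp [hc]

lemma replaceGo_filter (fuel : Nat) (l acc : List Char) (h : l.length ≤ fuel) :
    PySem.Chars.replace.go ['.'] [] fuel l acc = acc.reverse ++ l.filter (· ≠ '.') := by
  induction fuel generalizing l acc with
  | zero =>
    have : l = [] := List.eq_nil_of_length_eq_zero (Nat.le_zero.mp h)
    subst this; simp [PySem.Chars.replace.go]
  | succ fuel ih =>
    cases l with
    | nil => simp [PySem.Chars.replace.go]
    | cons c t =>
      by_cases hc : c = '.'
      · subst hc
        rw [show PySem.Chars.replace.go ['.'] [] (fuel + 1) ('.' :: t) acc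
              = PySem.Chars.replace.go ['.'] [] fuel (List.drop 1 ('.' :: t)) ([].reverse ++ acc) by
            simp [PySem.Chars.replace.go, List.isPrefixOf]]
        simp only [List.drop_one, List.tail_cons, List.reverse_nil, List.nil_append]
        rw [ih t acc (by simpa using Nat.le_of_succ_le_succ h)]
        simp
      · have hc' : ¬ ('.' = c) := fun hx => hc hx.symm
        rw [show PySem.Chars.replace.go ['.'] [] (fuel + 1) (c :: t) acc
              = PySem.Chars.replace.go ['.'] [] fuel t (c :: acc) by
            simp [PySem.Chars.replace.go, List.isPrefixOf, hc']]
        rw [ih t (c :: acc) (by simpa using Nat.le_of_succ_le_succ h)]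
        simp [hc]

lemma replace_filter (l : List Char) :
    PySem.Chars.replace l ['.'] [] = l.filter (· ≠ '.') := by
  rw [show PySem.Chars.replace l ['.'] [] = PySem.Chars.replace.go ['.'] [] l.length l [] by
        simp [PySem.Chars.replace]]
  rw [replaceGo_filter l.length l [] le_rfl]
  simp

-- ===== VERDICT (by name: the statement is the Claim_ definition above) =====
theorem remove_extradots_spec : Claim_equal_remove_extradots := by
  intro s _
  unfold Spec_remove_extradots
  simp only [remove_extradots_alt]
  by_cases hk : PySem.Str.find s "." = -1
  · -- no dot in the string: A copies every character, B returns the string unchanged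
    have hnin : '.' ∉ s.toList := by
      have := (PySem.Str.find_eq_neg_one_iff (s := s) (sub := ".")).mp hk
      simpa [List.singleton_infix_iff] using this
    rw [if_pos hk, portA_eq, fold_nodot s.toList [] (fun c hc hdot => hnin (hdot ▸ hc))]
    simp [String.ofList_toList]
  · rw [if_neg hk]
    have h0 : (0:Int) ≤ PySem.Chars.find s.toList ['.'] := by
      have h1 := PySem.Chars.neg_one_le_find (s := s.toList) (sub := ['.'])
      have h2 : PySem.Chars.find s.toList ['.'] ≠ -1 := by
        simpa [PySem.Str.find_eq] using hk
      omega
    obtain ⟨hpre, hmin⟩ := PySem.Chars.find_spec (s := s.toList) (sub := ['.']) h0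
    obtain ⟨k, hkdef⟩ : ∃ k, PySem.Chars.find s.toList ['.'] = k := ⟨_, rfl⟩
    rw [hkdef] at h0 hpre hmin
    obtain ⟨n, hndef⟩ : ∃ n, k.toNat = n := ⟨_, rfl⟩
    rw [hndef] at hpre hmin
    obtain ⟨t, ht⟩ := hpre
    have hn : n < s.toList.length := by
      by_contra hcon
      rw [List.drop_eq_nil_of_le (le_of_not_gt hcon)] at ht
      simp at ht
    have hnodot : ∀ c ∈ s.toList.take n, c ≠ '.' := by
      intro c hc
      obtain ⟨i, hi, rfl⟩ := List.getElem_of_mem hc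
      have hi' : i < n := by rw [List.length_take] at hi; omega
      intro hdot
      apply hmin i hi'
      refine ⟨s.toList.drop (i + 1), ?_⟩
      rw [List.getElem_take] at hdot
      rw [List.drop_eq_getElem_cons (show i < s.toList.length by omega), hdot]
      rfl
    have hsplit : s.toList = s.toList.take n ++ '.' :: t := by
      have h := List.take_append_drop n s.toList
      rw [← ht] at h
      exact h.symm
    have hlen : (s.toList.take n).length = n := by rw [List.length_take]; omega
    have hA : (s.toList.foldl pvStepA ((0:Int), ([]:List Char))).2
        = s.toList.take n ++ '.' :: t.filter (· ≠ '.') := by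
      conv_lhs => rw [hsplit]
      rw [List.foldl_append, fold_nodot _ [] hnodot, List.foldl_cons,
          show pvStepA (0, [] ++ s.toList.take n) '.' = (1, ([] ++ s.toList.take n) ++ ['.']) by
            simp [pvStepA],
          fold_after]
      simp
    have htake : s.toList.take (n + 1) = s.toList.take n ++ ['.'] := by
      conv_lhs => rw [hsplit, show n + 1 = (s.toList.take n).length + 1 by rw [hlen]]
      rw [List.take_length_add_append]
      rfl
    have hdrop : s.toList.drop (n + 1) = t := by
      conv_lhs => rw [hsplit, show n + 1 = (s.toList.take n).length + 1 by rw [hlen]]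
      rw [List.drop_length_add_append]
      rfl
    have hfind : PySem.Str.find s "." = k := by
      rw [PySem.Str.find_eq, show (".").toList = ['.'] from rfl, hkdef]
    have hk1 : ((k + 1 : Int)).toNat = n + 1 := by omega
    refine String.toList_inj.mp ?_
    rw [portA_eq, String.toList_ofList, hA, String.toList_append]
    have hslice2 : (PySem.Str.slice s (some (PySem.Str.find s "." + 1)) none).toList
        = s.toList.drop (n + 1) := by
      rw [hfind,
          show (PySem.Str.slice s (some (k + 1)) none).toList
            = PySem.List.slice s.toList (some (k + 1)) none by simp,
          PySem.List.slice_from s.toList (by omega), hk1]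
    have hslice1 : (PySem.Str.slice s none (some (PySem.Str.find s "." + 1))).toList
        = s.toList.take (n + 1) := by
      rw [hfind,
          show (PySem.Str.slice s none (some (k + 1))).toList
            = PySem.List.slice s.toList none (some (k + 1)) by simp,
          PySem.List.slice_to s.toList (by omega), hk1]
    have hrep : (PySem.Str.replace (PySem.Str.slice s (some (PySem.Str.find s "." + 1)) none) "." "").toList
        = t.filter (· ≠ '.') := by
      rw [PySem.Str.toList_replace, show (".").toList = ['.'] from rfl,
          show ("").toList = ([] : List Char) from rfl, hslice2, hdrop, replace_filter]
    rw [hslice1, hrep, htake]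
    simp
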